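-- pv_equiv track=rewrite | github.com/finjimcam/Ngram | Nonogram.py | _generate_clues
-- ===== SOURCE A (Python) =====
-- def _generate_clues(line):
--     clues = []
--     count = 0
--     for pixel in line:
--         if pixel == 0:  # Filled cell
--             count += 1
--         elif count > 0:
--             clues.append(count)
--             count = 0
--     if count > 0:
--         clues.append(count)
--     return clues
-- ===== SOURCE B (Python) =====
-- def _generate_clues(line):
--     # Run-scanning: find each maximal run of zeros and record its length.
--     clues = []
--     i, n = 0, len(line)
--     while i < n:
--         if line[i] == 0:
--             j = i
--             while j < n and line[j] == 0:
--                 j += 1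
--             clues.append(j - i)
--             i = j
--         else:
--             i += 1
--     return clues
-- ===== Notes on version B (the rewrite author's own statement) =====
-- stated objective: alternative
-- what changed: Replaces the running-counter-and-flush accumulator with a run-scanning pass that locates each maximal zero run and appends its length directly, so no counter state is threaded or flushed after the loop.
import Mathlib
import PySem

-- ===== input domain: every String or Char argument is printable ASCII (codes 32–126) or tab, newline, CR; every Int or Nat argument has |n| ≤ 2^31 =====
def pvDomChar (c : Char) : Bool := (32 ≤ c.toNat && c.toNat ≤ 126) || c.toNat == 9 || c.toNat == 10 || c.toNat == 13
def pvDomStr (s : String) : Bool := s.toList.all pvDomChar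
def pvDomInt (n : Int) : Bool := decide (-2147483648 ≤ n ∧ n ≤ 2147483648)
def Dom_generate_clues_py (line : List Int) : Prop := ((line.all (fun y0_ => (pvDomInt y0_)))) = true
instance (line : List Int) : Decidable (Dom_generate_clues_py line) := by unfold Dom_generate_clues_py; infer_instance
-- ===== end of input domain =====

-- B replaces A's running-counter-and-flush loop by a run-scanning pass over maximal zero runs (alternative decomposition, same O(n) cost).


-- ===== PORT A =====
-- A: fold over the line with state (clues, count), flushing count on a non-zero pixel and once more at the end.
def genCluesStep (s : List Int × Int) (pixel : Int) : List Int × Int :=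
  if pixel = 0 then (s.1, s.2 + 1)
  else if s.2 > 0 then (s.1 ++ [s.2], 0)
  else s

def generate_clues_py (line : List Int) : List Int :=
  let r := line.foldl genCluesStep ([], 0)
  if r.2 > 0 then r.1 ++ [r.2] else r.1

-- ===== PORT B =====
-- B: scan for maximal runs of zeros; `takeRun` is Source B's inner while loop (run length + rest).
def takeRun : List Int → Nat × List Int
  | [] => (0, [])
  | x :: xs => if x = 0 then ((takeRun xs).1 + 1, (takeRun xs).2) else (0, x :: xs)

theorem takeRun_len : ∀ (l : List Int), (takeRun l).2.length ≤ l.length := by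
  intro l
  induction l with
  | nil => simp [takeRun]
  | cons x xs ih =>
    simp only [takeRun]
    split
    · exact Nat.le_trans ih (Nat.le_succ _)
    · simp

def generate_clues_py_alt (line : List Int) : List Int :=
  match line with
  | [] => []
  | x :: xs =>
    if x = 0 then
      (((takeRun xs).1 + 1 : Nat) : Int) :: generate_clues_py_alt (takeRun xs).2
    else generate_clues_py_alt xs
termination_by line.length
decreasing_by
  · exact Nat.lt_succ_of_le (takeRun_len xs)
  · exact Nat.lt_succ_self _

-- ===== PRECONDITION & SPEC =====
def Spec_generate_clues_py (line : List Int) (out : List Int) : Prop := out = generate_clues_py_alt line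
instance (line : List Int) (out : List Int) : Decidable (Spec_generate_clues_py line out) := by unfold Spec_generate_clues_py; infer_instance

-- ===== CLAIM (what is proved, stated in full; the proofs are below) =====
def Claim_equal_generate_clues_py : Prop := ∀ (line : List Int), Dom_generate_clues_py line → Spec_generate_clues_py line (generate_clues_py line)

-- ===== LEMMAS AND PROOFS =====

-- proof helper: A's remaining computation from counter c (as a Nat) on suffix l
def preClue : Nat → List Int → List Int
  | c, [] => if 0 < c then [(c : Int)] else []
  | c, x :: xs =>
    if x = 0 then preClue (c + 1) xs
    else (if 0 < c then [(c : Int)] else []) ++ generate_clues_py_alt xs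

theorem preClue_pos : ∀ (xs : List Int) (c : Nat), 0 < c →
    preClue c xs = ((c + (takeRun xs).1 : Nat) : Int) :: generate_clues_py_alt (takeRun xs).2 := by
  intro xs
  induction xs with
  | nil => intro c hc; simp [preClue, takeRun, generate_clues_py_alt, hc]
  | cons x t ih =>
    intro c hc
    by_cases hx : x = 0
    · rw [preClue, if_pos hx, ih (c + 1) (Nat.succ_pos c)]
      simp [takeRun, hx]
      omega
    · simp [preClue, hx, takeRun, hc, generate_clues_py_alt]

theorem preClue_zero : ∀ (xs : List Int), preClue 0 xs = generate_clues_py_alt xs := by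
  intro xs
  cases xs with
  | nil => simp [preClue, generate_clues_py_alt]
  | cons x t =>
    by_cases hx : x = 0
    · rw [preClue, if_pos hx, preClue_pos t 1 Nat.one_pos]
      simp [generate_clues_py_alt, hx]
      omega
    · simp [preClue, hx, generate_clues_py_alt]

theorem genClues_main : ∀ (l : List Int) (acc : List Int) (c : Nat),
    (let r := l.foldl genCluesStep (acc, (c : Int));
     if r.2 > 0 then r.1 ++ [r.2] else r.1) = acc ++ preClue c l := by
  intro l
  induction l with
  | nil =>
    intro acc c
    by_cases hc : 0 < c
    · simp [preClue, hc]
    · have hc0 : c = 0 := by omega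
      subst hc0; simp [preClue]
  | cons x xs ih =>
    intro acc c
    by_cases hx : x = 0
    · have h1 : genCluesStep (acc, (c : Int)) x = (acc, ((c + 1 : Nat) : Int)) := by
        simp [genCluesStep, hx]
      rw [List.foldl_cons, h1]
      have := ih acc (c + 1)
      simp only at this ⊢
      rw [this]
      simp [preClue, hx]
    · by_cases hc : 0 < c
      · have h1 : genCluesStep (acc, (c : Int)) x = (acc ++ [(c : Int)], ((0 : Nat) : Int)) := by
          have hci : (0 : Int) < (c : Int) := by exact_mod_cast hc
          simp [genCluesStep, hx]
          omega
        rw [List.foldl_cons, h1]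
        have := ih (acc ++ [(c : Int)]) 0
        simp only at this ⊢
        rw [this, preClue_zero]
        simp [preClue, hx, hc]
      · have hc0 : c = 0 := by omega
        subst hc0
        have h1 : genCluesStep (acc, ((0 : Nat) : Int)) x = (acc, ((0 : Nat) : Int)) := by
          simp [genCluesStep, hx]
        rw [List.foldl_cons, h1]
        have := ih acc 0
        simp only at this ⊢
        rw [this, preClue_zero]
        simp [preClue, hx]

-- ===== VERDICT (by name: the statement is the Claim_ definition above) =====
theorem generate_clues_py_spec : Claim_equal_generate_clues_py := by
  intro line _
  unfold Spec_generate_clues_py generate_clues_py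
  have h := genClues_main line [] 0
  simp only [Nat.cast_zero] at h
  rw [h, preClue_zero]
  simp
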